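-- pv_equiv track=rewrite | github.com/nitin35byte/new_prython_practise_repo | Important Coding Questions/important-reverse substring.py | reverser_substrib
-- ===== SOURCE A (Python) =====
-- def reverser_substrib(a):
--     index = 0
--     result =""
--
--     while index <len(a):
--
--         if a[index].isalpha():
--             index+=1
--
--             continue
--
--         substring1=""
--
--         while index<len(a) and not a[index].isalpha():
--             substring1+=a[index]
--
--             index +=1
--
--         result+=substring1[::-1]
--
--     return  result
-- ===== SOURCE B (Python) =====
-- def reverser_substrib(a):
--     # Single pass: letters move the insertion mark to the end of the output;
--     # non-letters are inserted at the mark, so each run comes out reversed.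
--     out = []
--     seg = 0
--     for ch in a:
--         if ch.isalpha():
--             seg = len(out)
--         else:
--             out.insert(seg, ch)
--     return ''.join(out)
-- ===== Notes on version B (the rewrite author's own statement) =====
-- stated objective: alternative
-- what changed: Replaces A's nested while-loops (index scanning, per-run string accumulation via += and slice-reversal) with a single for-loop keeping an insertion mark: letters move the mark to the end of the output list, non-letters are inserted at the mark, so each run emerges reversed with no explicit reversal.
import Mathlib
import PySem

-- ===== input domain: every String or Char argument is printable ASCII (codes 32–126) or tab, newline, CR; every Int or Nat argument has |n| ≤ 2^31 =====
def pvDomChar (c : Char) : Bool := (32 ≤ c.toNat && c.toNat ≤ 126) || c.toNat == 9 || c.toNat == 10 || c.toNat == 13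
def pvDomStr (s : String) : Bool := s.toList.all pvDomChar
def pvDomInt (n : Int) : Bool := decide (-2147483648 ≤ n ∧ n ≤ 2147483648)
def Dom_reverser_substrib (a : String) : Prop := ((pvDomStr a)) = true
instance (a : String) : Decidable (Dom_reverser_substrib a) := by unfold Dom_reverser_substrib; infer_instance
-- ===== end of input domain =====

-- B replaces A's nested run-scanning while-loops by one pass with an insertion mark (no explicit reversal); objective: alternative decomposition, same cost.

-- ===== PORT A =====
-- the inner while loop: collects substring1 while the current char is not alphabetic
def pvA_inner (sub : List Char) : List Char → List Char × List Char
  | [] => (sub, [])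
  | c :: rest =>
    if !(PySem.Chars.isalpha c) then pvA_inner (sub ++ [c]) rest
    else (sub, c :: rest)

-- termination facts for the outer loop (cited by name in decreasing_by)
theorem pvA_inner_snd_le (l : List Char) : ∀ (sub : List Char), (pvA_inner sub l).2.length ≤ l.length := by
  induction l with
  | nil => intro sub; simp [pvA_inner]
  | cons c rest ih =>
    intro sub
    simp only [pvA_inner]
    split
    · exact Nat.le_succ_of_le (ih _)
    · simp

theorem pvA_inner_snd_lt (c : Char) (rest : List Char) (h : ¬ PySem.Chars.isalpha c = true) :
    (pvA_inner [] (c :: rest)).2.length < (c :: rest).length := by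
  simp only [pvA_inner, Bool.not_eq_true] at *
  simp [h]
  exact pvA_inner_snd_le rest [c]

-- the outer while loop over the remaining characters
def pvA_loop : List Char → List Char
  | [] => []
  | c :: rest =>
    if h : PySem.Chars.isalpha c then pvA_loop rest
    else
      let p := pvA_inner [] (c :: rest)
      -- substring1[::-1]
      ((PySem.List.slice? p.1 none none (-1)).getD []) ++ pvA_loop p.2
  termination_by l => l.length
  decreasing_by
  · simp
  · exact pvA_inner_snd_lt c rest h

def reverser_substrib (a : String) : String := String.ofList (pvA_loop a.toList)

-- ===== PORT B =====
def reverser_substrib_alt (a : String) : String :=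
  String.ofList ((a.toList.foldl
    (fun (st : List Char × Int) ch =>
      if PySem.Chars.isalpha ch then (st.1, PySem.List.len st.1)
      else (PySem.List.insert st.1 st.2 ch, st.2))
    ([], 0)).1)

-- ===== PRECONDITION & SPEC =====
def Spec_reverser_substrib (a : String) (out : String) : Prop := out = reverser_substrib_alt a
instance (a : String) (out : String) : Decidable (Spec_reverser_substrib a out) := by unfold Spec_reverser_substrib; infer_instance

-- ===== CLAIM (what is proved, stated in full; the proofs are below) =====
def Claim_equal_reverser_substrib : Prop := ∀ (a : String), Dom_reverser_substrib a → Spec_reverser_substrib a (reverser_substrib a)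

-- ===== LEMMAS AND PROOFS =====
theorem pvA_inner_eq (l : List Char) : ∀ (sub : List Char),
    pvA_inner sub l = (sub ++ l.takeWhile (fun c => !(PySem.Chars.isalpha c)),
                       l.dropWhile (fun c => !(PySem.Chars.isalpha c))) := by
  induction l with
  | nil => intro sub; simp [pvA_inner]
  | cons c rest ih =>
    intro sub
    simp only [pvA_inner, List.takeWhile, List.dropWhile]
    by_cases h : PySem.Chars.isalpha c = true <;> simp [h, ih]

theorem pvA_loop_run (l : List Char) :
    pvA_loop l = (l.takeWhile (fun c => !(PySem.Chars.isalpha c))).reverse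
      ++ pvA_loop (l.dropWhile (fun c => !(PySem.Chars.isalpha c))) := by
  cases l with
  | nil => simp [pvA_loop]
  | cons c rest =>
    by_cases h : PySem.Chars.isalpha c = true
    · simp [pvA_loop, h, List.takeWhile, List.dropWhile]
    · rw [pvA_loop]
      simp [h, pvA_inner_eq, PySem.List.slice?_none_none_neg_one]

theorem pvB_inv (l : List Char) : ∀ (p q : List Char),
    (l.foldl
      (fun (st : List Char × Int) ch =>
        if PySem.Chars.isalpha ch then (st.1, PySem.List.len st.1)
        else (PySem.List.insert st.1 st.2 ch, st.2))
      (p ++ q.reverse, (p.length : Int))).1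
    = p ++ (q ++ l.takeWhile (fun c => !(PySem.Chars.isalpha c))).reverse
        ++ pvA_loop (l.dropWhile (fun c => !(PySem.Chars.isalpha c))) := by
  induction l with
  | nil => intro p q; simp [pvA_loop]
  | cons c rest ih =>
    intro p q
    by_cases h : PySem.Chars.isalpha c = true
    · have hlen : PySem.List.len (p ++ q.reverse) = ((p ++ q.reverse).length : Int) := by
        simp [PySem.List.len]
      have hih := ih (p ++ q.reverse) []
      simp only [List.reverse_nil, List.append_nil] at hih
      rw [List.foldl_cons]
      simp only [h, if_true, hlen]
      rw [hih]
      simp [h, pvA_loop, pvA_loop_run rest, List.append_assoc]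
    · have hb : PySem.Chars.isalpha c = false := by simpa using h
      have hins : PySem.List.insert (p ++ q.reverse) ((p.length : Int)) c
          = p ++ (q ++ [c]).reverse := by
        rw [PySem.List.insert_natCast _ _ _ (by simp)]
        simp
      rw [List.foldl_cons]
      simp only [hb, Bool.false_eq_true, if_false]
      rw [hins, ih p (q ++ [c])]
      simp [hb, List.append_assoc]

-- ===== VERDICT (by name: the statement is the Claim_ definition above) =====
theorem reverser_substrib_spec : Claim_equal_reverser_substrib := by
  intro a _
  unfold Spec_reverser_substrib reverser_substrib reverser_substrib_alt
  have := pvB_inv a.toList [] []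
  simp only [List.nil_append, List.reverse_nil, List.length_nil, Nat.cast_zero] at this
  rw [this, ← pvA_loop_run]
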